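-- pv_equiv track=rewrite | github.com/tpbrisco/cfopscon | opcon/modules/director.py | add_job_wildcards
-- ===== SOURCE A (Python) =====
-- def add_job_wildcards(jobs):
--     '''Enrich the list of deployment jobs with wildcards'''
--     # a list like
--     #   api/<guid1>
--     #   diego_cell/<guid2>
--     #   diego_cell/<guid3>
--     # becomes
--     #   api/<guid1>
--     #   diego_cell/*
--     #   diego_cell/<guid2>
--     #   diego_cell/<guid3>
--     #
--     job_groups = dict()
--     for j in jobs:
--         group = j.split('/')[0]
--         if group not in job_groups:
--             job_groups[group] = list()
--         job_groups[group].append(j)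
--     # should have a full dictionary of the job groups now, with jobs listed in it
--     r_jobs = list()
--     for g in sorted(job_groups.keys()):  # maintain sorting
--         if len(job_groups[g]) > 1:
--             r_jobs.append(g + "/*")
--         r_jobs.extend(job_groups[g])
--     return r_jobs
-- ===== SOURCE B (Python) =====
-- def add_job_wildcards(jobs):
--     '''Enrich the list of deployment jobs with wildcards'''
--     # Sort jobs by their prefix (stable), then emit each consecutive run,
--     # preceded by "<prefix>/*" when the run has more than one member.
--     key = lambda j: j.split('/')[0]
--     s = sorted(jobs, key=key)
--     r_jobs = []
--     i = 0
--     n = len(s)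
--     while i < n:
--         k = key(s[i])
--         j = i + 1
--         while j < n and key(s[j]) == k:
--             j += 1
--         if j - i > 1:
--             r_jobs.append(k + '/*')
--         r_jobs.extend(s[i:j])
--         i = j
--     return r_jobs
-- ===== Notes on version B (the rewrite author's own statement) =====
-- stated objective: alternative
-- what changed: B drops A's grouping dict entirely: it stable-sorts the jobs by their '/'-prefix and emits each consecutive equal-prefix run in one scan, prepending 'prefix/*' when a run has more than one member.
import Mathlib
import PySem

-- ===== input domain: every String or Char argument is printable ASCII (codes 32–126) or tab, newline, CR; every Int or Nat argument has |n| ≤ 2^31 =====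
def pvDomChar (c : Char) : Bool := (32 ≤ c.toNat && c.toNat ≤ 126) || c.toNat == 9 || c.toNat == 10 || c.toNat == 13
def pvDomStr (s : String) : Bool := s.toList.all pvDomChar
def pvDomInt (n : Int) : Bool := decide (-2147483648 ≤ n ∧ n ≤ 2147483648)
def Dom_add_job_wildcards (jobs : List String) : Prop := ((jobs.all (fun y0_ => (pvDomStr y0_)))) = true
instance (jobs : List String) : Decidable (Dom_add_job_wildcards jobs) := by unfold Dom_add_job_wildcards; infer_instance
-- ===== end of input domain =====

-- B replaces A's grouping dict by a stable sort of the jobs by prefix followed by one scan over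
-- consecutive equal-prefix runs (alternative decomposition, same observable result).

-- j.split('/')[0], shared by both ports: sep "/" ≠ "" so split? is some, and a split is
-- never the empty list, so the [0] index can never raise.
def pvKey (j : String) : String := (((PySem.Str.split? j "/").getD []).headD "")

-- ===== PORT A =====
def add_job_wildcards (jobs : List String) : List String :=
  let job_groups := jobs.foldl (fun d j =>
    let group := pvKey j
    let d' := if d.contains group then d else d.insert group ([] : List String)
    d'.insert group (d'.getD group [] ++ [j])) (PySem.Dict.empty)
  (PySem.List.sorted job_groups.keys (fun x => x) false).foldl (fun r g =>
    let r' := if 1 < (job_groups.getD g []).length then r ++ [g ++ "/*"] else r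
    r' ++ job_groups.getD g []) []

-- ===== PORT B =====
-- Source B's index scan i..j over the sorted list, ported on the remaining suffix: the inner
-- while loop delimiting the run s[i:j] is the takeWhile/dropWhile split at the first
-- different prefix (same run, same order), and i = j advances to that suffix.
def runScan : List String → List String → List String
  | r_jobs, [] => r_jobs
  | r_jobs, x :: rest =>
    let k := pvKey x
    let run := x :: rest.takeWhile (fun y => pvKey y == k)
    let rest' := rest.dropWhile (fun y => pvKey y == k)
    runScan (if 1 < run.length then r_jobs ++ [k ++ "/*"] ++ run else r_jobs ++ run) rest'
termination_by _ l => l.length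
decreasing_by have := List.length_dropWhile_le (fun y => pvKey y == pvKey x) rest; simpa using Nat.lt_succ_of_le this

def add_job_wildcards_alt (jobs : List String) : List String :=
  runScan [] (PySem.List.sorted jobs pvKey false)

-- ===== PRECONDITION & SPEC =====
def Spec_add_job_wildcards (jobs : List String) (out : List String) : Prop := out = add_job_wildcards_alt jobs
instance (jobs : List String) (out : List String) : Decidable (Spec_add_job_wildcards jobs out) := by unfold Spec_add_job_wildcards; infer_instance

-- ===== CLAIM (what is proved, stated in full; the proofs are below) =====
def Claim_equal_add_job_wildcards : Prop := ∀ (jobs : List String), Dom_add_job_wildcards jobs → Spec_add_job_wildcards jobs (add_job_wildcards jobs)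

-- ===== LEMMAS AND PROOFS =====

-- the group of prefix g, in the original job order
def pvGrp (jobs : List String) (g : String) : List String := jobs.filter (fun j => pvKey j == g)

-- the distinct prefixes in increasing order
def pvKeys (jobs : List String) : List String :=
  PySem.List.sorted (PySem.Set.ofList (jobs.map pvKey)) (fun x => x) false

theorem pvFlatMap_congr {α β : Type} {K : List α} {F H : α → List β}
    (h : ∀ g ∈ K, F g = H g) : K.flatMap F = K.flatMap H := by
  induction K with
  | nil => rfl
  | cons g K ih =>
    simp only [List.flatMap_cons]
    rw [h g (by simp), ih (fun g hg => h g (by simp [hg]))]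

theorem pvInsertBy_skip {α : Type} (before : α → α → Bool) (x : α) (ms t : List α)
    (h : ∀ y ∈ ms, before x y = false) :
    PySem.List.insertBy before x (ms ++ t) = ms ++ PySem.List.insertBy before x t := by
  induction ms with
  | nil => rfl
  | cons m ms ih =>
    simp only [List.cons_append, PySem.List.insertBy, h m (by simp)]
    simp only [Bool.false_eq_true, if_false, List.cons_inj_right]
    exact ih (fun y hy => h y (by simp [hy]))

theorem pvInsertBy_front {α : Type} (before : α → α → Bool) (x : α) (t : List α)
    (h : ∀ y ∈ t, before x y = true) :
    PySem.List.insertBy before x t = x :: t := by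
  cases t with
  | nil => rfl
  | cons y t => simp [PySem.List.insertBy, h y (by simp)]

-- inserting one job into a key-grouped flattened list
theorem pvInsert_flatMap (j : String) : ∀ (K : List String) (G : String → List String),
    K.Pairwise (· < ·) →
    (∀ g ∈ K, ∀ m ∈ G g, pvKey m = g) →
    (∀ g ∈ K, G g ≠ []) →
    (pvKey j ∉ K → G (pvKey j) = []) →
    PySem.List.insertBy (fun a b => decide (pvKey a < pvKey b)) j (K.flatMap G)
      = (if pvKey j ∈ K then K
         else PySem.List.insertBy (fun a b => decide (a < b)) (pvKey j) K).flatMap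
          (fun g => G g ++ if g = pvKey j then [j] else []) := by
  intro K
  induction K with
  | nil =>
    intro G _ _ _ hj0
    have hnm : pvKey j ∉ ([] : List String) := by simp
    rw [if_neg hnm]
    simp [PySem.List.insertBy, hj0 hnm]
  | cons g0 K' ih =>
    intro G hK hG hne hj0
    have hK' : K'.Pairwise (· < ·) := hK.of_cons
    have hlt : ∀ g ∈ K', g0 < g := fun g hg => List.rel_of_pairwise_cons hK hg
    rcases lt_trichotomy (pvKey j) g0 with hcmp | hcmp | hcmp
    · -- pvKey j < g0 : j becomes a new first singleton group
      have hnotin : pvKey j ∉ g0 :: K' := by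
        intro h
        rcases List.mem_cons.mp h with h | h
        · exact absurd (h ▸ hcmp) (lt_irrefl _)
        · exact absurd (hcmp.trans (hlt _ h)) (by simp)
      obtain ⟨m0, t0, hG0⟩ := List.exists_cons_of_ne_nil (hne g0 (by simp))
      have hm0 : pvKey m0 = g0 := hG g0 (by simp) m0 (by simp [hG0])
      rw [if_neg hnotin]
      have h1 : PySem.List.insertBy (fun a b => decide (pvKey a < pvKey b)) j ((g0 :: K').flatMap G)
          = j :: (g0 :: K').flatMap G := by
        simp only [List.flatMap_cons, hG0, List.cons_append, PySem.List.insertBy, hm0]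
        simp [hcmp]
      rw [h1]
      have h2 : PySem.List.insertBy (fun a b => decide (a < b)) (pvKey j) (g0 :: K')
          = pvKey j :: g0 :: K' := by
        simp [PySem.List.insertBy, hcmp]
      rw [h2]
      have h3 : K'.flatMap (fun g => G g ++ if g = pvKey j then [j] else []) = K'.flatMap G := by
        apply pvFlatMap_congr
        intro g hg
        have hgne : g ≠ pvKey j := by
          intro he; exact hnotin (by simp [he ▸ hg])
        rw [if_neg hgne, List.append_nil]
      have hg0 : ¬ (g0 = pvKey j) := by
        intro he; rw [he] at hcmp; exact lt_irrefl _ hcmp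
      simp [h3, hj0 hnotin, hg0]
    · -- pvKey j = g0 : j is appended at the end of the g0-group
      have hmem : pvKey j ∈ g0 :: K' := by simp [hcmp]
      rw [if_pos hmem]
      simp only [List.flatMap_cons]
      rw [pvInsertBy_skip _ _ _ _ (by
        intro y hy
        have := hG g0 (by simp) y hy
        simp [this, hcmp])]
      rw [pvInsertBy_front _ _ _ (by
        intro y hy
        obtain ⟨g, hg, hyg⟩ := List.mem_flatMap.mp hy
        have := hG g (by simp [hg]) y hyg
        simp [this, hcmp ▸ hlt g hg])]
      have h3 : K'.flatMap (fun g => G g ++ if g = pvKey j then [j] else []) = K'.flatMap G := by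
        apply pvFlatMap_congr
        intro g hg
        have hgne : g ≠ pvKey j := by
          intro he; have h := hlt g hg; rw [he, hcmp] at h; exact absurd h (lt_irrefl _)
        rw [if_neg hgne, List.append_nil]
      rw [h3, if_pos hcmp.symm]
      simp
    · -- g0 < pvKey j : skip the g0-group and recurse
      have hne0 : g0 ≠ pvKey j := ne_of_lt hcmp
      have hskip : PySem.List.insertBy (fun a b => decide (pvKey a < pvKey b)) j ((g0 :: K').flatMap G)
          = G g0 ++ PySem.List.insertBy (fun a b => decide (pvKey a < pvKey b)) j (K'.flatMap G) := by
        simp only [List.flatMap_cons]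
        exact pvInsertBy_skip _ _ _ _ (by
          intro y hy
          have := hG g0 (by simp) y hy
          simp [this, not_lt_of_gt hcmp])
      rw [hskip]
      rw [ih G hK' (fun g hg => hG g (by simp [hg])) (fun g hg => hne g (by simp [hg]))
        (fun h => hj0 (by simp [hne0.symm, h]))]
      by_cases hmem : pvKey j ∈ K'
      · rw [if_pos hmem, if_pos (by simp [hmem])]
        simp only [List.flatMap_cons, if_neg hne0, List.append_nil]
      · rw [if_neg hmem, if_neg (by simp [hmem, hne0.symm])]
        have h2 : PySem.List.insertBy (fun a b => decide (a < b)) (pvKey j) (g0 :: K')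
            = g0 :: PySem.List.insertBy (fun a b => decide (a < b)) (pvKey j) K' := by
          simp [PySem.List.insertBy, not_lt_of_gt hcmp]
        rw [h2]
        simp only [List.flatMap_cons, if_neg hne0, List.append_nil]

theorem pvGrp_key (jobs : List String) (g m : String) (hm : m ∈ pvGrp jobs g) : pvKey m = g := by
  unfold pvGrp at hm
  have := List.of_mem_filter hm
  simpa using this

theorem pvKeys_mem (jobs : List String) (g : String) : g ∈ pvKeys jobs ↔ g ∈ jobs.map pvKey := by
  unfold pvKeys
  rw [PySem.List.mem_sorted, PySem.Set.mem_ofList]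

theorem pvKeys_pairwise (jobs : List String) : (pvKeys jobs).Pairwise (· < ·) :=
  PySem.List.sorted_ofList_pairwise_lt _

theorem pvGrp_ne_nil (jobs : List String) (g : String) (hg : g ∈ pvKeys jobs) : pvGrp jobs g ≠ [] := by
  obtain ⟨x, hx, hkx⟩ := List.mem_map.mp ((pvKeys_mem jobs g).mp hg)
  exact List.ne_nil_of_mem (List.mem_filter.mpr ⟨hx, by simp [hkx]⟩)

theorem pvGrp_nil (jobs : List String) (g : String) (hg : g ∉ pvKeys jobs) : pvGrp jobs g = [] := by
  rw [pvGrp, List.filter_eq_nil_iff]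
  intro x hx
  simp only [beq_iff_eq]
  intro he
  exact hg ((pvKeys_mem jobs g).mpr (List.mem_map.mpr ⟨x, hx, he⟩))

theorem pvSorted_append_singleton_id (S : List String) (k : String) :
    PySem.List.sorted (S ++ [k]) (fun x => x) false
      = PySem.List.insertBy (fun a b => decide (a < b)) k (PySem.List.sorted S (fun x => x) false) := by
  rw [PySem.List.sorted_eq_foldl_insertBy, PySem.List.sorted_eq_foldl_insertBy, List.foldl_append]
  rfl

theorem pvKeys_append (jobs : List String) (j : String) :
    pvKeys (jobs ++ [j]) = if pvKey j ∈ pvKeys jobs then pvKeys jobs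
      else PySem.List.insertBy (fun a b => decide (a < b)) (pvKey j) (pvKeys jobs) := by
  by_cases hmem : pvKey j ∈ pvKeys jobs
  · rw [if_pos hmem]
    unfold pvKeys
    simp only [List.map_append, List.map_cons, List.map_nil]
    have h1 : PySem.Set.ofList (jobs.map pvKey ++ [pvKey j]) = PySem.Set.ofList (jobs.map pvKey) := by
      rw [PySem.Set.ofList_eq_foldl, PySem.Set.ofList_eq_foldl, List.foldl_append]
      simp only [List.foldl_cons, List.foldl_nil]
      rw [← PySem.Set.ofList_eq_foldl]
      obtain ⟨x, hx, he⟩ := List.mem_map.mp ((pvKeys_mem jobs _).mp hmem)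
      simp only [PySem.Set.add]
      rw [if_pos (by simp only [PySem.Set.contains, List.contains_iff_mem, PySem.Set.mem_ofList]; exact List.mem_map.mpr ⟨x, hx, he⟩)]
    rw [h1]
  · rw [if_neg hmem]
    unfold pvKeys
    simp only [List.map_append, List.map_cons, List.map_nil]
    have h1 : PySem.Set.ofList (jobs.map pvKey ++ [pvKey j]) = PySem.Set.ofList (jobs.map pvKey) ++ [pvKey j] := by
      rw [PySem.Set.ofList_eq_foldl, PySem.Set.ofList_eq_foldl, List.foldl_append]
      simp only [List.foldl_cons, List.foldl_nil]
      rw [← PySem.Set.ofList_eq_foldl]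
      have hm' : pvKey j ∉ PySem.Set.ofList (jobs.map pvKey) := by
        intro h
        exact hmem ((pvKeys_mem jobs _).mpr ((PySem.Set.mem_ofList _ _).mp h))
      simp only [PySem.Set.add]
      rw [if_neg (by simp only [PySem.Set.contains, List.contains_iff_mem, PySem.Set.mem_ofList]; simpa [PySem.Set.mem_ofList] using hm')]
    rw [h1, pvSorted_append_singleton_id]

theorem pvGrp_append (jobs : List String) (j g : String) :
    pvGrp (jobs ++ [j]) g = pvGrp jobs g ++ if g = pvKey j then [j] else [] := by
  unfold pvGrp
  rw [List.filter_append]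
  by_cases hg : g = pvKey j
  · simp [hg]
  · simp [hg, Ne.symm hg]

theorem pvMainChar (jobs : List String) :
    PySem.List.sorted jobs pvKey false = (pvKeys jobs).flatMap (pvGrp jobs) := by
  induction jobs using List.reverseRecOn with
  | nil => rfl
  | append_singleton jobs j ih =>
    have hL : PySem.List.sorted (jobs ++ [j]) pvKey false
        = PySem.List.insertBy (fun a b => decide (pvKey a < pvKey b)) j (PySem.List.sorted jobs pvKey false) := by
      rw [PySem.List.sorted_eq_foldl_insertBy, PySem.List.sorted_eq_foldl_insertBy, List.foldl_append]
      rfl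
    rw [hL, ih,
      pvInsert_flatMap j (pvKeys jobs) (pvGrp jobs) (pvKeys_pairwise jobs)
        (fun g hg m hm => pvGrp_key jobs g m hm) (fun g hg => pvGrp_ne_nil jobs g hg)
        (fun h => pvGrp_nil jobs _ h),
      pvKeys_append]
    apply pvFlatMap_congr
    intro g _
    rw [pvGrp_append]

theorem pvFoldA_getD : ∀ (l : List String) (d : PySem.Dict String (List String)) (g : String),
    (l.foldl (fun d j =>
      let group := pvKey j
      let d' := if d.contains group then d else d.insert group ([] : List String)
      d'.insert group (d'.getD group [] ++ [j])) d).getD g []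
    = d.getD g [] ++ l.filter (fun j => pvKey j == g) := by
  intro l
  induction l with
  | nil => simp
  | cons j l ih =>
    intro d g
    rw [List.foldl_cons, ih]
    have hstep : ∀ (d : PySem.Dict String (List String)),
        ((if d.contains (pvKey j) then d else d.insert (pvKey j) ([] : List String)).insert (pvKey j)
          ((if d.contains (pvKey j) then d else d.insert (pvKey j) ([] : List String)).getD (pvKey j) [] ++ [j])).getD g []
        = d.getD g [] ++ if pvKey j == g then [j] else [] := by
      intro d
      by_cases hc : d.contains (pvKey j) = true
      · rw [if_pos hc, PySem.Dict.getD_insert]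
        by_cases hg : g = pvKey j
        · simp [hg]
        · simp [hg, Ne.symm hg]
      · have hc' : d.contains (pvKey j) = false := by simpa using hc
        rw [if_neg (by simp [hc']), PySem.Dict.getD_insert]
        by_cases hg : g = pvKey j
        · simp [hg, PySem.Dict.getD_insert_self, PySem.Dict.getD_of_not_contains d _ hc']
        · rw [if_neg hg, PySem.Dict.getD_insert_of_ne _ _ _ hg]
          simp [Ne.symm hg]
    rw [hstep d, List.filter_cons]
    by_cases hg : pvKey j == g
    · simp [hg]
    · simp [hg]

theorem pvFoldA_keys : ∀ (l : List String) (d : PySem.Dict String (List String)),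
    (l.foldl (fun d j =>
      let group := pvKey j
      let d' := if d.contains group then d else d.insert group ([] : List String)
      d'.insert group (d'.getD group [] ++ [j])) d).keys
    = PySem.Set.update d.keys (l.map pvKey) := by
  intro l
  induction l with
  | nil => intro d; rfl
  | cons j l ih =>
    intro d
    rw [List.foldl_cons, ih]
    have hstep : ((if d.contains (pvKey j) then d else d.insert (pvKey j) ([] : List String)).insert (pvKey j)
          ((if d.contains (pvKey j) then d else d.insert (pvKey j) ([] : List String)).getD (pvKey j) [] ++ [j])).keys
        = PySem.Set.add d.keys (pvKey j) := by
      by_cases hc : d.contains (pvKey j) = true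
      · rw [if_pos hc, PySem.Dict.keys_insert_of_contains d _ hc]
        simp only [PySem.Set.add]
        rw [if_pos (by
          simp only [PySem.Set.contains, List.contains_iff_mem]
          exact (PySem.Dict.contains_iff_mem_keys d _).mp hc)]
      · have hc' : d.contains (pvKey j) = false := by simpa using hc
        rw [if_neg (by simp [hc']),
          PySem.Dict.keys_insert_of_contains _ _ (PySem.Dict.contains_insert_self d _ _),
          PySem.Dict.keys_insert_of_not_contains d _ hc']
        simp only [PySem.Set.add]
        rw [if_neg (by
          simp only [PySem.Set.contains, List.contains_iff_mem]
          intro h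
          rw [(PySem.Dict.contains_iff_mem_keys d _).mpr h] at hc'
          exact Bool.true_eq_false.mp hc')]
    rw [hstep]
    simp only [List.map_cons, PySem.Set.update, List.foldl_cons]

theorem pvA_body (jobs : List String) (D : PySem.Dict String (List String))
    (hk : D.keys = PySem.Set.ofList (jobs.map pvKey))
    (hgetD : ∀ g, D.getD g [] = pvGrp jobs g) :
    (PySem.List.sorted D.keys (fun x => x) false).foldl (fun r g =>
      let r' := if 1 < (D.getD g []).length then r ++ [g ++ "/*"] else r
      r' ++ D.getD g []) []
    = (pvKeys jobs).flatMap
        (fun g => (if 1 < (pvGrp jobs g).length then [g ++ "/*"] else []) ++ pvGrp jobs g) := by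
  dsimp only
  have h : ∀ (r : List String) (g : String), g ∈ PySem.List.sorted D.keys (fun x => x) false →
      (if 1 < (D.getD g []).length then r ++ [g ++ "/*"] else r) ++ D.getD g []
      = r ++ ((if 1 < (pvGrp jobs g).length then [g ++ "/*"] else []) ++ pvGrp jobs g) := by
    intro r g _
    rw [hgetD g]
    by_cases hlen : 1 < (pvGrp jobs g).length
    · simp [hlen]
    · simp [hlen]
  refine (PySem.List.foldl_congr_mem _ _ _ _ h).trans ?_
  rw [PySem.List.foldl_append_eq_flatMap, hk]
  rfl

theorem pvA_char (jobs : List String) :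
    add_job_wildcards jobs =
      (pvKeys jobs).flatMap
        (fun g => (if 1 < (pvGrp jobs g).length then [g ++ "/*"] else []) ++ pvGrp jobs g) := by
  unfold add_job_wildcards
  exact pvA_body jobs _
    (by rw [pvFoldA_keys, PySem.Set.ofList_eq_foldl]; rfl)
    (fun g => by rw [pvFoldA_getD]; simp [pvGrp])

theorem pvTakeAll (p : String → Bool) : ∀ (l t : List String), (∀ x ∈ l, p x = true) →
    (l ++ t).takeWhile p = l ++ t.takeWhile p := by
  intro l
  induction l with
  | nil => intro t _; rfl
  | cons m l ih =>
    intro t h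
    simp only [List.cons_append, List.takeWhile_cons, h m (by simp), if_true]
    rw [ih t (fun x hx => h x (by simp [hx]))]

theorem pvTakeNil (p : String → Bool) (t : List String) (h : ∀ x ∈ t, p x = false) :
    t.takeWhile p = [] := by
  cases t with
  | nil => rfl
  | cons m t => simp [h m (by simp)]

theorem pvDropAll (p : String → Bool) : ∀ (l t : List String), (∀ x ∈ l, p x = true) →
    (l ++ t).dropWhile p = t.dropWhile p := by
  intro l
  induction l with
  | nil => intro t _; rfl
  | cons m l ih =>
    intro t h
    simp only [List.cons_append, List.dropWhile_cons, h m (by simp), if_true]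
    exact ih t (fun x hx => h x (by simp [hx]))

theorem pvDropNil (p : String → Bool) (t : List String) (h : ∀ x ∈ t, p x = false) :
    t.dropWhile p = t := by
  cases t with
  | nil => rfl
  | cons m t => simp [h m (by simp)]

theorem pvRunScan_char : ∀ (K : List String) (G : String → List String),
    K.Pairwise (· < ·) →
    (∀ g ∈ K, ∀ m ∈ G g, pvKey m = g) →
    (∀ g ∈ K, G g ≠ []) →
    ∀ acc, runScan acc (K.flatMap G)
      = acc ++ K.flatMap (fun g => (if 1 < (G g).length then [g ++ "/*"] else []) ++ G g) := by
  intro K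
  induction K with
  | nil => intro G _ _ _ acc; simp [runScan]
  | cons g0 K' ih =>
    intro G hK hG hne acc
    obtain ⟨m, t, hG0⟩ := List.exists_cons_of_ne_nil (hne g0 (by simp))
    have hm : pvKey m = g0 := hG g0 (by simp) m (by simp [hG0])
    have hlt : ∀ g ∈ K', g0 < g := fun g hg => List.rel_of_pairwise_cons hK hg
    have htt : ∀ x ∈ t, (pvKey x == pvKey m) = true := by
      intro x hx
      have := hG g0 (by simp) x (by simp [hG0, hx])
      rw [this, hm]
      simp
    have hrest : ∀ x ∈ K'.flatMap G, (pvKey x == pvKey m) = false := by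
      intro x hx
      obtain ⟨g, hg, hxg⟩ := List.mem_flatMap.mp hx
      have h1 := hG g (by simp [hg]) x hxg
      have h2 : pvKey x ≠ pvKey m := by
        rw [h1, hm]
        exact ne_of_gt (hlt g hg)
      simpa using h2
    rw [List.flatMap_cons, hG0, List.cons_append]
    rw [runScan]
    rw [pvTakeAll _ t _ htt, pvTakeNil _ _ hrest, pvDropAll _ t _ htt, pvDropNil _ _ hrest,
      List.append_nil]
    rw [ih G hK.of_cons (fun g hg => hG g (by simp [hg])) (fun g hg => hne g (by simp [hg]))]
    rw [List.flatMap_cons, ← hG0, hm]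
    by_cases hlen : 1 < (G g0).length
    · rw [if_pos (by rw [hG0] at hlen ⊢; simpa using hlen), if_pos hlen]
      simp [hG0]
    · rw [if_neg (by rw [hG0] at hlen ⊢; simpa using hlen), if_neg hlen]
      simp [hG0]

theorem pvB_char (jobs : List String) :
    add_job_wildcards_alt jobs =
      (pvKeys jobs).flatMap
        (fun g => (if 1 < (pvGrp jobs g).length then [g ++ "/*"] else []) ++ pvGrp jobs g) := by
  unfold add_job_wildcards_alt
  rw [pvMainChar, pvRunScan_char (pvKeys jobs) (pvGrp jobs) (pvKeys_pairwise jobs)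
    (fun g _ m hm => pvGrp_key jobs g m hm) (fun g hg => pvGrp_ne_nil jobs g hg)]
  rfl

-- ===== VERDICT (by name: the statement is the Claim_ definition above) =====
theorem add_job_wildcards_spec : Claim_equal_add_job_wildcards := by
  intro jobs _
  unfold Spec_add_job_wildcards
  rw [pvA_char, pvB_char]
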